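-- pv_equiv track=rewrite | github.com/elliottlash12/UD_Old_Irish-CritMinorGlossesMilan | not_to_release/current_conllu_maker.py | list_of_dets_and_nouns_in
-- ===== SOURCE A (Python) =====
-- def list_of_dets_and_nouns_in(a_sentence):
--     list_of_dets = []
--     list_of_nouns = []
--     list_of_preps = []
--     list_of_nominal_pos = ['noun', 'pronoun_demonstrative_distal', 'pronoun_demonstrative_proximate', 'verbal_noun', 'proper_noun', 'adjective_pronominal', 'pronoun_propword']
--     list_of_determiner_pos = ['definite_article', 'adjective_quantifier', 'adjective_numeral', 'pronoun_possessive']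
--     for word in a_sentence:
--         if word['Part_Of_Speech'] in list_of_nominal_pos:
--             list_of_nouns.append(word)
--         elif word['Part_Of_Speech'] in list_of_determiner_pos:
--             list_of_dets.append(word)
--         elif word['Part_Of_Speech'] == 'preposition':
--             list_of_preps.append(word)
--     return list_of_dets, list_of_nouns, list_of_preps
-- ===== SOURCE B (Python) =====
-- def list_of_dets_and_nouns_in(a_sentence):
--     nominal = {'noun', 'pronoun_demonstrative_distal', 'pronoun_demonstrative_proximate',
--                'verbal_noun', 'proper_noun', 'adjective_pronominal', 'pronoun_propword'}
--     determiner = {'definite_article', 'adjective_quantifier', 'adjective_numeral',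
--                   'pronoun_possessive'}
--     dets = [w for w in a_sentence if w['Part_Of_Speech'] in determiner]
--     nouns = [w for w in a_sentence if w['Part_Of_Speech'] in nominal]
--     preps = [w for w in a_sentence if w['Part_Of_Speech'] == 'preposition']
--     return dets, nouns, preps
-- ===== Notes on version B (the rewrite author's own statement) =====
-- stated objective: idiomatic
-- what changed: Replaces the single stateful if/elif loop appending to three mutable lists by three independent filtering passes (comprehensions) over the sentence, one per category, relying on the disjointness of the POS category sets.
import Mathlib
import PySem

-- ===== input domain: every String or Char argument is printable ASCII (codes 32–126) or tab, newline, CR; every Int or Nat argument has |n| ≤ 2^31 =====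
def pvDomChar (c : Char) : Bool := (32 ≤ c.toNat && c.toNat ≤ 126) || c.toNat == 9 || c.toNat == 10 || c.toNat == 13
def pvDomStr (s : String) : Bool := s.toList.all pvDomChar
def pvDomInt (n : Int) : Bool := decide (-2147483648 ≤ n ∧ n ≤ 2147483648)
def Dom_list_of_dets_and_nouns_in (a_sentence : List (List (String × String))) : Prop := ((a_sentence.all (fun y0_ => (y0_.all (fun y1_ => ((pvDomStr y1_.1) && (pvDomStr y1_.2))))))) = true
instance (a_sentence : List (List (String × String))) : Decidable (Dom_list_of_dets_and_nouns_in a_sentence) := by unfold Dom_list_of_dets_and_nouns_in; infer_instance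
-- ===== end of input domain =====

-- B replaces A's single stateful if/elif loop over three accumulators by three independent
-- filtering passes, one per POS category (objective: idiomatic; same return value).
-- Pre_ excludes words lacking the 'Part_Of_Speech' key, on which the Python raises KeyError.

-- ===== PORT A =====
-- word['Part_Of_Speech'] : first-match lookup in the association list (KeyError = none, excluded by Pre_)
def pvPos (word : List (String × String)) : String :=
  (List.lookup "Part_Of_Speech" word).getD ""

def pvNominalPos : List String :=
  ["noun", "pronoun_demonstrative_distal", "pronoun_demonstrative_proximate",
   "verbal_noun", "proper_noun", "adjective_pronominal", "pronoun_propword"]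

def pvDeterminerPos : List String :=
  ["definite_article", "adjective_quantifier", "adjective_numeral", "pronoun_possessive"]

-- the for-loop of A: threads the three accumulator lists, appending at the back
def pvLoopA : List (List (String × String)) →
    (List (List (String × String))) × (List (List (String × String))) × (List (List (String × String))) →
    (List (List (String × String))) × (List (List (String × String))) × (List (List (String × String)))
  | [], acc => acc
  | word :: rest, (dets, nouns, preps) =>
      if pvNominalPos.contains (pvPos word) then
        pvLoopA rest (dets, nouns ++ [word], preps)
      else if pvDeterminerPos.contains (pvPos word) then
        pvLoopA rest (dets ++ [word], nouns, preps)
      else if pvPos word == "preposition" then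
        pvLoopA rest (dets, nouns, preps ++ [word])
      else
        pvLoopA rest (dets, nouns, preps)

def list_of_dets_and_nouns_in (a_sentence : List (List (String × String))) : (List (List (String × String))) × (List (List (String × String))) × (List (List (String × String))) :=
  pvLoopA a_sentence ([], [], [])

-- ===== PORT B =====
-- three independent filters (the Python set literals are the same collections of strings)
def list_of_dets_and_nouns_in_alt (a_sentence : List (List (String × String))) : (List (List (String × String))) × (List (List (String × String))) × (List (List (String × String))) :=
  (a_sentence.filter (fun w => pvDeterminerPos.contains (pvPos w)),
   a_sentence.filter (fun w => pvNominalPos.contains (pvPos w)),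
   a_sentence.filter (fun w => pvPos w == "preposition"))

-- ===== PRECONDITION & SPEC =====
-- excludes exactly the inputs where some word lacks 'Part_Of_Speech' (Python A raises KeyError there)
def Pre_list_of_dets_and_nouns_in (a_sentence : List (List (String × String))) : Prop :=
  a_sentence.all (fun w => (List.lookup "Part_Of_Speech" w).isSome) = true
instance (a_sentence : List (List (String × String))) : Decidable (Pre_list_of_dets_and_nouns_in a_sentence) := by unfold Pre_list_of_dets_and_nouns_in; infer_instance

def pvWitness_list_of_dets_and_nouns_in : (List (List (String × String))) :=
  [[("Part_Of_Speech", "noun"), ("Lemma", "ben")],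
   [("Part_Of_Speech", "definite_article")],
   [("Part_Of_Speech", "preposition")],
   [("Part_Of_Speech", "verb")]]

def Spec_list_of_dets_and_nouns_in (a_sentence : List (List (String × String))) (out : (List (List (String × String))) × (List (List (String × String))) × (List (List (String × String)))) : Prop := out = list_of_dets_and_nouns_in_alt a_sentence
instance (a_sentence : List (List (String × String))) (out : (List (List (String × String))) × (List (List (String × String))) × (List (List (String × String)))) : Decidable (Spec_list_of_dets_and_nouns_in a_sentence out) := by unfold Spec_list_of_dets_and_nouns_in; infer_instance

-- ===== CLAIM (what is proved, stated in full; the proofs are below) =====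
def Claim_equal_list_of_dets_and_nouns_in : Prop := ∀ (a_sentence : List (List (String × String))), Dom_list_of_dets_and_nouns_in a_sentence → Pre_list_of_dets_and_nouns_in a_sentence → Spec_list_of_dets_and_nouns_in a_sentence (list_of_dets_and_nouns_in a_sentence)

-- ===== LEMMAS AND PROOFS =====

-- the elif chain is mutually exclusive: the category word-lists are pairwise disjoint
lemma nominal_not_det {s : String} (h : s ∈ pvNominalPos) :
    s ∉ pvDeterminerPos := by
  simp only [pvNominalPos, List.mem_cons, List.not_mem_nil, or_false] at h
  rcases h with rfl | rfl | rfl | rfl | rfl | rfl | rfl <;> decide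

lemma nominal_not_prep {s : String} (h : s ∈ pvNominalPos) :
    s ≠ "preposition" := by
  simp only [pvNominalPos, List.mem_cons, List.not_mem_nil, or_false] at h
  rcases h with rfl | rfl | rfl | rfl | rfl | rfl | rfl <;> decide

lemma det_not_prep {s : String} (h : s ∈ pvDeterminerPos) :
    s ≠ "preposition" := by
  simp only [pvDeterminerPos, List.mem_cons, List.not_mem_nil, or_false] at h
  rcases h with rfl | rfl | rfl | rfl <;> decide

-- loop invariant: pvLoopA appends, to each accumulator, the corresponding filter of the rest
lemma pvLoopA_eq (s : List (List (String × String)))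
    (d n p : List (List (String × String))) :
    pvLoopA s (d, n, p) =
      (d ++ s.filter (fun w => pvDeterminerPos.contains (pvPos w)),
       n ++ s.filter (fun w => pvNominalPos.contains (pvPos w)),
       p ++ s.filter (fun w => pvPos w == "preposition")) := by
  induction s generalizing d n p with
  | nil => simp [pvLoopA]
  | cons w rest ih =>
    by_cases hn : pvPos w ∈ pvNominalPos
    · simp [pvLoopA, hn, ih, nominal_not_det hn, nominal_not_prep hn]
    · by_cases hd : pvPos w ∈ pvDeterminerPos
      · simp [pvLoopA, hn, hd, ih, det_not_prep hd]
      · by_cases hp : pvPos w = "preposition"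
        · simp [pvLoopA, hd, hp, ih, pvNominalPos, pvDeterminerPos]
        · simp [pvLoopA, hn, hd, hp, ih, List.filter_cons]

-- ===== VERDICT (by name: the statement is the Claim_ definition above) =====
theorem list_of_dets_and_nouns_in_spec : Claim_equal_list_of_dets_and_nouns_in := by
  intro s _ _
  show _ = _
  simp [list_of_dets_and_nouns_in, list_of_dets_and_nouns_in_alt, pvLoopA_eq]
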